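-- pv_equiv track=rewrite | github.com/G0032/Base64-Reverser | solve.py | leet_translate
-- ===== SOURCE A (Python) =====
-- leet_dict = {
--     '4': ['A'],
--     '3': ['E'],
--     '1': ['I', 'L'],
--     '7': ['T', 'L'],
--     '0': ['O'],
--     '$': ['S'],
--     '5': ['S'],
--     '@': ['A'],
--     '!': ['I'],
-- }
--
-- def leet_translate(text):
--     """Generate all possible translations of leetspeak words."""
--     from itertools import product
--
--     chars = []
--     for char in text:
--         if char in leet_dict:
--             chars.append(leet_dict[char])
--         else:
--             chars.append([char])
--
--     # Cartesian product of all substitutions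
--     possibilities = [''.join(candidate) for candidate in product(*chars)]
--     return possibilities
-- ===== SOURCE B (Python) =====
-- leet_dict = {
--     '4': ['A'],
--     '3': ['E'],
--     '1': ['I', 'L'],
--     '7': ['T', 'L'],
--     '0': ['O'],
--     '$': ['S'],
--     '5': ['S'],
--     '@': ['A'],
--     '!': ['I'],
-- }
--
-- def leet_translate(text):
--     """Generate all possible translations of leetspeak words."""
--     results = ['']
--     for char in text:
--         options = leet_dict.get(char, [char])
--         results = [prefix + opt for prefix in results for opt in options]
--     return results
-- ===== Notes on version B (the rewrite author's own statement) =====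
-- stated objective: idiomatic
-- what changed: Replaces the two-pass build (options list, then itertools.product of full tuples joined into strings) by a single left-to-right fold that extends growing prefix strings with each character's options.
import Mathlib
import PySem

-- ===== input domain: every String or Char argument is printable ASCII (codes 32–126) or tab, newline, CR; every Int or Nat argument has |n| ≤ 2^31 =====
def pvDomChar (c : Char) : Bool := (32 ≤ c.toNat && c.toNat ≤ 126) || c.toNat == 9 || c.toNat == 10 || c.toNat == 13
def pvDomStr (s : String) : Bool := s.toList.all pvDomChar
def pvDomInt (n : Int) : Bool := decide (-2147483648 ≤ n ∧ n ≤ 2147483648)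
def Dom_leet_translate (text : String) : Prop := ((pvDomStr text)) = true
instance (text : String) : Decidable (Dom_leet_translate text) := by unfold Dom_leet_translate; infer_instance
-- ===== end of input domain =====

-- B replaces the options-list + itertools.product construction with a single left-to-right fold over growing prefix strings (idiomatic decomposition, same output order).


-- ===== PORT A =====
-- module constant leet_dict (shared by A and B, as in the Python module)
def pvLeetDict : PySem.Dict String (List String) :=
  PySem.Dict.ofList [("4", ["A"]), ("3", ["E"]), ("1", ["I", "L"]), ("7", ["T", "L"]),
    ("0", ["O"]), ("$", ["S"]), ("5", ["S"]), ("@", ["A"]), ("!", ["I"])]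

-- Cartesian product of the substitution lists, itertools.product's order (rightmost fastest)
def pvProduct : List (List String) → List (List String)
  | [] => [[]]
  | l :: ls => l.flatMap (fun x => (pvProduct ls).map (fun t => x :: t))

def leet_translate (text : String) : List String :=
  let chars := text.toList.foldl (fun acc c =>
    let s := String.ofList [c]
    match pvLeetDict.get? s with
    | some v => acc ++ [v]
    | none => acc ++ [[s]]) []
  (pvProduct chars).map (fun candidate => PySem.Str.join "" candidate)


-- ===== PORT B =====
def leet_translate_alt (text : String) : List String :=
  text.toList.foldl (fun results c =>
    let s := String.ofList [c]
    let options := (pvLeetDict.get? s).getD [s]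
    results.flatMap (fun prefix_ => options.map (fun opt => prefix_ ++ opt))) [""]


-- ===== PRECONDITION & SPEC =====
def Spec_leet_translate (text : String) (out : List String) : Prop := out = leet_translate_alt text
instance (text : String) (out : List String) : Decidable (Spec_leet_translate text out) := by unfold Spec_leet_translate; infer_instance

-- ===== CLAIM (what is proved, stated in full; the proofs are below) =====
def Claim_equal_leet_translate : Prop := ∀ (text : String), Dom_leet_translate text → Spec_leet_translate text (leet_translate text)

-- ===== LEMMAS AND PROOFS =====

-- the per-character option list both programs use
def pvOpts (c : Char) : List String :=
  (pvLeetDict.get? (String.ofList [c])).getD [String.ofList [c]]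

theorem join_empty_cons (x : String) (t : List String) :
    PySem.Str.join "" (x :: t) = x ++ PySem.Str.join "" t := by
  simp [PySem.Str.join, PySem.Chars.join, List.intercalate]
  cases t with
  | nil => simp
  | cons b r => simp [String.ofList_append]

theorem join_empty_nil : PySem.Str.join "" ([] : List String) = "" := by
  simp [PySem.Str.join, PySem.Chars.join, List.intercalate]

theorem charsFold_eq (l : List Char) (acc : List (List String)) :
    l.foldl (fun acc c =>
      let s := String.ofList [c]
      match pvLeetDict.get? s with
      | some v => acc ++ [v]
      | none => acc ++ [[s]]) acc = acc ++ l.map pvOpts := by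
  induction l generalizing acc with
  | nil => simp
  | cons c t ih =>
    simp only [List.foldl_cons, List.map_cons, ih, pvOpts]
    cases h : pvLeetDict.get? (String.ofList [c]) <;> simp

theorem foldB_eq (ls : List Char) (acc : List String) :
    ls.foldl (fun results c =>
      let s := String.ofList [c]
      let options := (pvLeetDict.get? s).getD [s]
      results.flatMap (fun prefix_ => options.map (fun opt => prefix_ ++ opt))) acc
    = acc.flatMap (fun p => (pvProduct (ls.map pvOpts)).map
        (fun t => p ++ PySem.Str.join "" t)) := by
  induction ls generalizing acc with
  | nil =>
    simp [pvProduct, join_empty_nil]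
  | cons c t ih =>
    simp only [List.foldl_cons, List.map_cons, pvProduct, ih]
    rw [List.flatMap_assoc]
    congr 1
    funext p
    rw [List.flatMap_map, List.map_flatMap]
    congr 1
    funext x
    rw [List.map_map]
    congr 1
    funext u
    simp [join_empty_cons, String.append_assoc]

-- ===== VERDICT (by name: the statement is the Claim_ definition above) =====
theorem leet_translate_spec : Claim_equal_leet_translate := by
  intro text _
  unfold Spec_leet_translate leet_translate leet_translate_alt
  rw [charsFold_eq, foldB_eq]
  simp
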